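-- pv_equiv track=rewrite | github.com/uslap-protocol/uslap-engine | Code_files/USLaP_Engine.py | _check_n15_priority
-- ===== SOURCE A (Python) =====
-- def _check_n15_priority(consonants: list) -> bool:
--     """
--     R09: Check if consonant skeleton matches N15 pattern → force ق-ر-ن first.
--     N15 network = القَرْن DERIVATIVE FAMILY.  Triggered if ANY valid triple
--     (ci, ri, ni) exists where ci < ri < ni — handles words like CONCERN where
--     a nasal appears early before 'r' but another 'n' follows (c-n-c-R-N).
--     """
--     ck_set    = {'c', 'k', 'g', 'q'}
--     ck_pos    = [i for i, c in enumerate(consonants) if c in ck_set]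
--     r_pos     = [i for i, c in enumerate(consonants) if c == 'r']
--     n_pos     = [i for i, c in enumerate(consonants) if c == 'n']
--     if not (ck_pos and r_pos and n_pos):
--         return False
--     # Check if ANY valid triple exists with ci < ri < ni
--     for ci in ck_pos:
--         for ri in r_pos:
--             if ri <= ci:
--                 continue
--             for ni in n_pos:
--                 if ni > ri:
--                     return True
--     return False
-- ===== SOURCE B (Python) =====
-- def _check_n15_priority(consonants: list) -> bool:
--     # Single left-to-right pass: greedy subsequence match of [ck-class, 'r', 'n'].
--     state = 0  # 0 = waiting for c/k/g/q, 1 = waiting for 'r', 2 = waiting for 'n'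
--     for c in consonants:
--         if state == 0:
--             if c in ('c', 'k', 'g', 'q'):
--                 state = 1
--         elif state == 1:
--             if c == 'r':
--                 state = 2
--         elif c == 'n':
--             return True
--     return False
-- ===== Notes on version B (the rewrite author's own statement) =====
-- stated objective: faster
-- what changed: Replaces the three enumerate passes plus triple nested index loops with one left-to-right pass running a 3-state greedy subsequence matcher (earliest ck, then earliest r after it, then any n).
import Mathlib
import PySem

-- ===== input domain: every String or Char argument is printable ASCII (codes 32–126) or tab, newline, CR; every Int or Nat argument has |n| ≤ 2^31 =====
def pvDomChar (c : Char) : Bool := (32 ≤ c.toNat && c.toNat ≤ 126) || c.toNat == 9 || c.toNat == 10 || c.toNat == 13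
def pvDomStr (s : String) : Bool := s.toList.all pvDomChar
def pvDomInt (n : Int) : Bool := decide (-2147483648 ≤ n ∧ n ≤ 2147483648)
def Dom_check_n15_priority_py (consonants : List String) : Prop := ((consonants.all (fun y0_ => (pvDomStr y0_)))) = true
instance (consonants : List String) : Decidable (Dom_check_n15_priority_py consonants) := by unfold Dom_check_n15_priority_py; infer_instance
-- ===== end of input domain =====

-- B replaces A's triple nested loop over precomputed position lists by one linear
-- 3-state greedy subsequence scan (objective: faster, asymptotic).

-- ===== PORT A =====
-- ck_set = {'c','k','g','q'}
def pvCkSet : PySem.Set String := PySem.Set.ofList ["c", "k", "g", "q"]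

def check_n15_priority_py (consonants : List String) : Bool :=
  -- the three comprehensions [i for i, c in enumerate(consonants) if …]
  let ck_pos : List Int := (PySem.List.enumerate consonants).filterMap
    (fun p => if PySem.Set.contains pvCkSet p.2 then some p.1 else none)
  let r_pos : List Int := (PySem.List.enumerate consonants).filterMap
    (fun p => if p.2 = "r" then some p.1 else none)
  let n_pos : List Int := (PySem.List.enumerate consonants).filterMap
    (fun p => if p.2 = "n" then some p.1 else none)
  if ¬(ck_pos ≠ [] ∧ r_pos ≠ [] ∧ n_pos ≠ []) then false
  else
    -- for ci in ck_pos: for ri in r_pos: if ri <= ci: continue; for ni in n_pos: if ni > ri: return True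
    ck_pos.any (fun ci => r_pos.any (fun ri =>
      if ri ≤ ci then false else n_pos.any (fun ni => decide (ri < ni))))

-- ===== PORT B =====
-- the for-loop of Source B over `consonants` carrying `state`; returning True = result true
def pvAltLoop (l : List String) (state : Nat) : Bool :=
  match l with
  | [] => false
  | c :: rest =>
    if state = 0 then pvAltLoop rest (if c ∈ ["c", "k", "g", "q"] then 1 else 0)
    else if state = 1 then pvAltLoop rest (if c = "r" then 2 else 1)
    else if c = "n" then true else pvAltLoop rest state

def check_n15_priority_py_alt (consonants : List String) : Bool :=
  pvAltLoop consonants 0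

-- ===== PRECONDITION & SPEC =====
def Spec_check_n15_priority_py (consonants : List String) (out : Bool) : Prop := out = check_n15_priority_py_alt consonants
instance (consonants : List String) (out : Bool) : Decidable (Spec_check_n15_priority_py consonants out) := by unfold Spec_check_n15_priority_py; infer_instance

-- ===== CLAIM (what is proved, stated in full; the proofs are below) =====
def Claim_equal_check_n15_priority_py : Prop := ∀ (consonants : List String), Dom_check_n15_priority_py consonants → Spec_check_n15_priority_py consonants (check_n15_priority_py consonants)

-- ===== LEMMAS AND PROOFS =====

-- "somewhere j < k with l[j] = 'r' and l[k] = 'n'"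
def pvRN (l : List String) : Prop :=
  ∃ j k : Nat, j < k ∧ l[j]? = some "r" ∧ l[k]? = some "n"

-- "somewhere i < j < k with l[i] ∈ ck, l[j] = 'r', l[k] = 'n'"
def pvE (l : List String) : Prop :=
  ∃ i j k : Nat, i < j ∧ j < k ∧
    (∃ c, l[i]? = some c ∧ c ∈ ["c", "k", "g", "q"]) ∧
    l[j]? = some "r" ∧ l[k]? = some "n"

-- simple recursive characterisations
def pvSpecRN : List String → Bool
  | [] => false
  | c :: l => if c = "r" then l.contains "n" else pvSpecRN l

def pvSpecCK : List String → Bool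
  | [] => false
  | c :: l => if c ∈ ["c", "k", "g", "q"] then pvSpecRN l else pvSpecCK l

theorem pvRN_mem {l : List String} (h : pvRN l) : "n" ∈ l := by
  obtain ⟨j, k, _, _, hn⟩ := h
  exact List.mem_of_getElem? hn

theorem pvE_RN {l : List String} (h : pvE l) : pvRN l := by
  obtain ⟨i, j, k, _, hjk, _, hr, hn⟩ := h
  exact ⟨j, k, hjk, hr, hn⟩

theorem pvRN_cons (c : String) (l : List String) :
    pvRN (c :: l) ↔ (c = "r" ∧ "n" ∈ l) ∨ pvRN l := by
  constructor
  · rintro ⟨j, k, hjk, hr, hn⟩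
    match j, k with
    | 0, k + 1 =>
      left
      refine ⟨by simpa using hr, ?_⟩
      simp only [List.getElem?_cons_succ] at hn
      exact List.mem_of_getElem? hn
    | j + 1, k + 1 =>
      right
      simp only [List.getElem?_cons_succ] at hr hn
      exact ⟨j, k, by omega, hr, hn⟩
  · rintro (⟨hc, hn⟩ | ⟨j, k, hjk, hr, hn⟩)
    · obtain ⟨k, hk⟩ := List.mem_iff_getElem?.mp hn
      exact ⟨0, k + 1, by omega, by simpa using hc, by simpa using hk⟩
    · exact ⟨j + 1, k + 1, by omega, by simpa using hr, by simpa using hn⟩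

theorem pvE_cons (c : String) (l : List String) :
    pvE (c :: l) ↔ (c ∈ ["c", "k", "g", "q"] ∧ pvRN l) ∨ pvE l := by
  constructor
  · rintro ⟨i, j, k, hij, hjk, ⟨d, hd, hdm⟩, hr, hn⟩
    match i, j, k with
    | 0, j + 1, k + 1 =>
      left
      simp only [List.getElem?_cons_zero, Option.some.injEq] at hd
      simp only [List.getElem?_cons_succ] at hr hn
      exact ⟨hd ▸ hdm, j, k, by omega, hr, hn⟩
    | i + 1, j + 1, k + 1 =>
      right
      simp only [List.getElem?_cons_succ] at hd hr hn
      exact ⟨i, j, k, by omega, by omega, ⟨d, hd, hdm⟩, hr, hn⟩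
  · rintro (⟨hc, j, k, hjk, hr, hn⟩ | ⟨i, j, k, hij, hjk, hck, hr, hn⟩)
    · exact ⟨0, j + 1, k + 1, by omega, by omega, ⟨c, by simp, hc⟩,
        by simpa using hr, by simpa using hn⟩
    · exact ⟨i + 1, j + 1, k + 1, by omega, by omega,
        by simpa using hck, by simpa using hr, by simpa using hn⟩

theorem pvSpecRN_iff (l : List String) : pvSpecRN l = true ↔ pvRN l := by
  induction l with
  | nil => simp [pvSpecRN, pvRN]
  | cons c l ih =>
    rw [pvRN_cons]
    by_cases hc : c = "r"
    · simp only [pvSpecRN, if_pos hc, List.contains_eq_mem, decide_eq_true_eq]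
      constructor
      · exact fun h => Or.inl ⟨hc, h⟩
      · rintro (⟨_, h⟩ | h)
        · exact h
        · exact pvRN_mem h
    · simp only [pvSpecRN, if_neg hc, ih]
      constructor
      · exact Or.inr
      · rintro (⟨h, _⟩ | h)
        · exact absurd h hc
        · exact h

theorem pvSpecCK_iff (l : List String) : pvSpecCK l = true ↔ pvE l := by
  induction l with
  | nil => simp [pvSpecCK, pvE]
  | cons c l ih =>
    rw [pvE_cons]
    by_cases hc : c ∈ ["c", "k", "g", "q"]
    · simp only [pvSpecCK, if_pos hc, pvSpecRN_iff]
      constructor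
      · exact fun h => Or.inl ⟨hc, h⟩
      · rintro (⟨_, h⟩ | h)
        · exact h
        · exact pvE_RN h
    · simp only [pvSpecCK, if_neg hc, ih]
      constructor
      · exact Or.inr
      · rintro (⟨h, _⟩ | h)
        · exact absurd h hc
        · exact h

-- membership in A's comprehension lists
theorem pv_mem_pos (l : List String) (p : String → Prop) [DecidablePred p] (i : Int) :
    i ∈ (PySem.List.enumerate l).filterMap
        (fun q => if p q.2 then some q.1 else none) ↔
      ∃ (k : Nat), i = (k : Int) ∧ ∃ h : k < l.length, p l[k] := by
  simp only [List.mem_filterMap, PySem.List.mem_enumerate_iff]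
  constructor
  · rintro ⟨⟨a, c⟩, ⟨k, hk, heq⟩, hf⟩
    injection heq with h1 h2
    subst h1; subst h2
    by_cases hp : p l[k]
    · simp only [hp, if_true, Option.some.injEq] at hf
      exact ⟨k, by omega, hk, hp⟩
    · simp [hp] at hf
  · rintro ⟨k, rfl, hk, hp⟩
    exact ⟨(((0 : Int) + (k : Int)), l[k]), ⟨k, hk, by simp⟩, by simp [hp]⟩

theorem pvA_iff (l : List String) : check_n15_priority_py l = true ↔ pvE l := by
  unfold check_n15_priority_py
  set ck_pos := (PySem.List.enumerate l).filterMap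
    (fun p => if PySem.Set.contains pvCkSet p.2 then some p.1 else none) with hck
  set r_pos := (PySem.List.enumerate l).filterMap
    (fun p => if p.2 = "r" then some p.1 else none) with hr
  set n_pos := (PySem.List.enumerate l).filterMap
    (fun p => if p.2 = "n" then some p.1 else none) with hn
  have hsetlit : pvCkSet = ["c", "k", "g", "q"] := by decide
  have hckm : ∀ i, i ∈ ck_pos ↔
      ∃ (k : Nat), i = (k : Int) ∧ ∃ h : k < l.length, l[k] ∈ ["c", "k", "g", "q"] := by
    intro i
    rw [hck]
    rw [pv_mem_pos l (fun s => PySem.Set.contains pvCkSet s = true) i]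
    constructor
    · rintro ⟨k, rfl, h, hp⟩
      exact ⟨k, rfl, h, hsetlit ▸ List.mem_of_elem_eq_true hp⟩
    · rintro ⟨k, rfl, h, hp⟩
      exact ⟨k, rfl, h, List.elem_eq_true_of_mem (hsetlit ▸ hp)⟩
  have hrm : ∀ i, i ∈ r_pos ↔
      ∃ (k : Nat), i = (k : Int) ∧ ∃ h : k < l.length, l[k] = "r" := by
    intro i
    rw [hr]
    exact pv_mem_pos l (fun s => s = "r") i
  have hnm : ∀ i, i ∈ n_pos ↔
      ∃ (k : Nat), i = (k : Int) ∧ ∃ h : k < l.length, l[k] = "n" := by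
    intro i
    rw [hn]
    exact pv_mem_pos l (fun s => s = "n") i
  have hmain : (ck_pos.any (fun ci => r_pos.any (fun ri =>
      if ri ≤ ci then false else n_pos.any (fun ni => decide (ri < ni))))) = true ↔ pvE l := by
    simp only [List.any_eq_true]
    constructor
    · rintro ⟨ci, hci, ri, hri, hcond⟩
      by_cases hle : ri ≤ ci
      · simp [hle] at hcond
      · rw [if_neg hle, List.any_eq_true] at hcond
        obtain ⟨ni, hni, hlt⟩ := hcond
        obtain ⟨i, rfl, hi, hil⟩ := (hckm ci).mp hci
        obtain ⟨j, rfl, hj, hjl⟩ := (hrm ri).mp hri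
        obtain ⟨k, rfl, hk, hkl⟩ := (hnm ni).mp hni
        simp only [decide_eq_true_eq] at hlt
        refine ⟨i, j, k, by omega, by omega,
          ⟨l[i], by rw [List.getElem?_eq_getElem hi], hil⟩,
          by rw [List.getElem?_eq_getElem hj, hjl],
          by rw [List.getElem?_eq_getElem hk, hkl]⟩
    · rintro ⟨i, j, k, hij, hjk, ⟨d, hd, hdm⟩, hjr, hkn⟩
      obtain ⟨hi, hdi⟩ := List.getElem?_eq_some_iff.mp hd
      obtain ⟨hj, hjv⟩ := List.getElem?_eq_some_iff.mp hjr
      obtain ⟨hk, hkv⟩ := List.getElem?_eq_some_iff.mp hkn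
      refine ⟨(i : Int), (hckm _).mpr ⟨i, rfl, hi, hdi ▸ hdm⟩,
        (j : Int), (hrm _).mpr ⟨j, rfl, hj, hjv⟩, ?_⟩
      rw [if_neg (by omega), List.any_eq_true]
      exact ⟨(k : Int), (hnm _).mpr ⟨k, rfl, hk, hkv⟩, by simp; omega⟩
  by_cases hg : ¬(ck_pos ≠ [] ∧ r_pos ≠ [] ∧ n_pos ≠ [])
  · rw [if_pos hg]
    constructor
    · intro hF; simp at hF
    · intro hE
      exfalso
      apply hg
      obtain ⟨i, j, k, hij, hjk, ⟨d, hd, hdm⟩, hjr, hkn⟩ := hE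
      obtain ⟨hi, hdi⟩ := List.getElem?_eq_some_iff.mp hd
      obtain ⟨hj, hjv⟩ := List.getElem?_eq_some_iff.mp hjr
      obtain ⟨hk, hkv⟩ := List.getElem?_eq_some_iff.mp hkn
      refine ⟨?_, ?_, ?_⟩
      · exact List.ne_nil_of_mem ((hckm _).mpr ⟨i, rfl, hi, hdi ▸ hdm⟩)
      · exact List.ne_nil_of_mem ((hrm _).mpr ⟨j, rfl, hj, hjv⟩)
      · exact List.ne_nil_of_mem ((hnm _).mpr ⟨k, rfl, hk, hkv⟩)
  · rw [if_neg hg]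
    exact hmain

-- B-side characterisation
theorem pvAltLoop2 (l : List String) : pvAltLoop l 2 = l.contains "n" := by
  induction l with
  | nil => simp [pvAltLoop]
  | cons c l ih =>
    by_cases h : c = "n"
    · simp [pvAltLoop, h]
    · have hbe : ("n" == c) = false := beq_eq_false_iff_ne.mpr (fun he => h he.symm)
      simp only [pvAltLoop, h, ih, List.contains_cons, hbe]
      simp

theorem pvAltLoop1 (l : List String) : pvAltLoop l 1 = pvSpecRN l := by
  induction l with
  | nil => simp [pvAltLoop, pvSpecRN]
  | cons c l ih =>
    simp only [pvAltLoop, pvSpecRN]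
    by_cases h : c = "r" <;> simp [h, ih, pvAltLoop2]

theorem pvAltLoop0 (l : List String) : pvAltLoop l 0 = pvSpecCK l := by
  induction l with
  | nil => simp [pvAltLoop, pvSpecCK]
  | cons c l ih =>
    simp only [pvAltLoop, pvSpecCK]
    by_cases h : c ∈ ["c", "k", "g", "q"] <;> simp [h, ih, pvAltLoop1]

-- ===== VERDICT (by name: the statement is the Claim_ definition above) =====
theorem check_n15_priority_py_spec : Claim_equal_check_n15_priority_py := by
  intro l _
  unfold Spec_check_n15_priority_py check_n15_priority_py_alt
  rw [pvAltLoop0, Bool.eq_iff_iff, pvA_iff, pvSpecCK_iff]
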